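-- pv_equiv track=rewrite | github.com/ggiaroli/MWEM | MWEM_2D.py | queryToBinary
-- ===== SOURCE A (Python) =====
-- def queryToBinary(qi, cols, rows):
--     binary = [[0]*cols for i in range(rows)]
--     key = list(qi)[0]
--     startInd = min(key[0], key[1])
--     endInd = max(key[0], key[1])
--     startInd2 = min(qi[key][0], qi[key][1])
--     endInd2 = max(qi[key][0], qi[key][1])
--     for i in range(rows):
--         if (i >= startInd) and (i <= endInd):
--             for j in range(cols):
--                 if (j >= startInd2) and (j <= endInd2):
--                     binary[i][j] = 1
--     return binary
-- ===== SOURCE B (Python) =====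
-- def queryToBinary(qi, cols, rows):
--     (k0, k1), v = next(iter(qi.items()))
--     n = max(rows, 0)
--     r0 = max(0, min(k0, k1))
--     r1 = min(n - 1, max(k0, k1))
--     c0 = max(0, min(v[0], v[1]))
--     c1 = min(cols - 1, max(v[0], v[1]))
--     zero = [0] * cols
--     if r0 > r1 or c0 > c1:
--         return [list(zero) for _ in range(n)]
--     fill = [0] * c0 + [1] * (c1 - c0 + 1) + [0] * (cols - 1 - c1)
--     return ([list(zero) for _ in range(r0)]
--             + [list(fill) for _ in range(r1 - r0 + 1)]
--             + [list(zero) for _ in range(n - 1 - r1)])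
-- ===== Notes on version B (the rewrite author's own statement) =====
-- stated objective: alternative
-- what changed: A scans every cell of the rows x cols grid with per-cell membership tests; B computes the clamped rectangle bounds once and assembles the matrix directly from replicated zero/fill row segments, with no per-cell loop and no conditionals inside loops.
import Mathlib
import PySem

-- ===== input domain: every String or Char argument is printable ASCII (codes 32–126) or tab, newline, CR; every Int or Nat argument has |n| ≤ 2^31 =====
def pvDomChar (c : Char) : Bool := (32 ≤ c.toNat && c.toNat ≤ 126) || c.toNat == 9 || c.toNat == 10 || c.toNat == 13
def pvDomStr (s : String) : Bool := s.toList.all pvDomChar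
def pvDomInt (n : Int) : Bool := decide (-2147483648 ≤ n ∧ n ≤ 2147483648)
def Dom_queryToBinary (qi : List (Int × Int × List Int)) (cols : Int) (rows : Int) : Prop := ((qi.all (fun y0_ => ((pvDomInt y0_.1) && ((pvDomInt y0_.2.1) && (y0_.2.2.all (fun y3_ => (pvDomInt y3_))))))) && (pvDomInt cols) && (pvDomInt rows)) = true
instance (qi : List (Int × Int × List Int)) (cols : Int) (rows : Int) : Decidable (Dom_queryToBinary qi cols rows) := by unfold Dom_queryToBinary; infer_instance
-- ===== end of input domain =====

-- B replaces A's per-cell scan with per-cell membership tests by a direct assembly of the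
-- matrix from clamped rectangle bounds and replicated row segments (objective: alternative).


-- ===== PORT A =====
-- key = list(qi)[0] is the dict's first key; qi[key] is then the first-match lookup of that
-- key, i.e. exactly the first entry's value, so the match binds both at once.
-- binary[i][j] = 1 touches only row i of iteration i, so the outer write-loop is the map
-- producing row i; the inner loop is the literal fold mutating the row with List.set.
def queryToBinary (qi : List (Int × Int × List Int)) (cols : Int) (rows : Int) : List (List Int) :=
  match qi with
  | [] => []  -- unreachable under Pre_: list(qi)[0] raises IndexError
  | (k0, k1, v) :: _ =>
    match v with
    | v0 :: v1 :: _ =>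
      let startInd := min k0 k1
      let endInd := max k0 k1
      let startInd2 := min v0 v1
      let endInd2 := max v0 v1
      (PySem.List.pyRange 0 rows 1).map (fun i =>
        let row := List.replicate cols.toNat (0 : Int)
        if startInd ≤ i ∧ i ≤ endInd then
          (PySem.List.pyRange 0 cols 1).foldl
            (fun r j => if startInd2 ≤ j ∧ j ≤ endInd2 then r.set j.toNat 1 else r) row
        else row)
    | _ => []  -- unreachable under Pre_: qi[key][0]/[1] raises IndexError

-- ===== PORT B =====
def queryToBinary_alt (qi : List (Int × Int × List Int)) (cols : Int) (rows : Int) : List (List Int) :=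
  match PySem.List.pyGet? qi 0 with   -- next(iter(qi.items())): the first entry
  | none => []  -- unreachable under Pre_: empty dict
  | some (k0, k1, v) =>
    match PySem.List.pyGet? v 0, PySem.List.pyGet? v 1 with   -- v[0], v[1]
    | some w0, some w1 =>
      let n := rows.toNat
      let r0 := max 0 (min k0 k1)
      let r1 := min ((n : Int) - 1) (max k0 k1)
      let c0 := max 0 (min w0 w1)
      let c1 := min (cols - 1) (max w0 w1)
      let zero := List.replicate cols.toNat (0 : Int)
      if r0 > r1 ∨ c0 > c1 then List.replicate n zero
      else
        let fill := List.replicate c0.toNat 0 ++ List.replicate (c1 - c0 + 1).toNat 1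
                      ++ List.replicate (cols - 1 - c1).toNat 0
        List.replicate r0.toNat zero ++ List.replicate (r1 - r0 + 1).toNat fill
          ++ List.replicate ((n : Int) - 1 - r1).toNat zero
    | _, _ => []  -- unreachable under Pre_: first value shorter than 2

-- ===== PRECONDITION & SPEC =====
-- Pre_ excludes exactly the inputs where the Python A raises IndexError: an empty dict
-- (list(qi)[0]) or a first value with fewer than two elements (qi[key][0]/qi[key][1]).
def Pre_queryToBinary (qi : List (Int × Int × List Int)) (cols : Int) (rows : Int) : Prop :=
  qi ≠ [] ∧ 2 ≤ qi.headI.2.2.length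
instance (qi : List (Int × Int × List Int)) (cols : Int) (rows : Int) : Decidable (Pre_queryToBinary qi cols rows) := by unfold Pre_queryToBinary; infer_instance

def pvWitness_queryToBinary : (List (Int × Int × List Int)) × Int × Int := ([(1, 2, [0, 3])], 4, 4)

def Spec_queryToBinary (qi : List (Int × Int × List Int)) (cols : Int) (rows : Int) (out : List (List Int)) : Prop := out = queryToBinary_alt qi cols rows
instance (qi : List (Int × Int × List Int)) (cols : Int) (rows : Int) (out : List (List Int)) : Decidable (Spec_queryToBinary qi cols rows out) := by unfold Spec_queryToBinary; infer_instance

-- ===== CLAIM (what is proved, stated in full; the proofs are below) =====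
def Claim_equal_queryToBinary : Prop := ∀ (qi : List (Int × Int × List Int)) (cols : Int) (rows : Int), Dom_queryToBinary qi cols rows → Pre_queryToBinary qi cols rows → Spec_queryToBinary qi cols rows (queryToBinary qi cols rows)

-- ===== LEMMAS AND PROOFS =====

-- The set-fold preserves the row length.
lemma foldSet_length (lo hi : Int) (js : List Int) (L : List Int) :
    (js.foldl (fun r j => if lo ≤ j ∧ j ≤ hi then r.set j.toNat 1 else r) L).length = L.length := by
  induction js generalizing L with
  | nil => rfl
  | cons j rest ih =>
      simp only [List.foldl_cons]
      rw [ih]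
      split <;> simp

-- Element-wise effect of the set-fold over a list of non-negative indices.
lemma foldSet_getElem (lo hi : Int) (js : List Int) (hjs : ∀ j ∈ js, 0 ≤ j)
    (L : List Int) (k : Nat) (hk : k < L.length)
    (hk' : k < (js.foldl (fun r j => if lo ≤ j ∧ j ≤ hi then r.set j.toNat 1 else r) L).length) :
    (js.foldl (fun r j => if lo ≤ j ∧ j ≤ hi then r.set j.toNat 1 else r) L)[k] =
      if (k : Int) ∈ js ∧ lo ≤ (k : Int) ∧ (k : Int) ≤ hi then 1 else L[k] := by
  induction js generalizing L with
  | nil => simp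
  | cons j rest ih =>
      have hj : 0 ≤ j := hjs j (by simp)
      have hrest : ∀ x ∈ rest, 0 ≤ x := fun x hx => hjs x (by simp [hx])
      simp only [List.foldl_cons] at hk' ⊢
      have hlen : (if lo ≤ j ∧ j ≤ hi then L.set j.toNat 1 else L).length = L.length := by
        split <;> simp
      rw [ih hrest _ (by omega) hk']
      by_cases hband : lo ≤ j ∧ j ≤ hi
      · simp only [if_pos hband]
        by_cases hmem : (k : Int) ∈ rest ∧ lo ≤ (k : Int) ∧ (k : Int) ≤ hi
        · simp [hmem, List.mem_cons.mpr (Or.inr hmem.1)]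
        · simp only [if_neg hmem]
          rw [List.getElem_set]
          by_cases hje : j.toNat = k
          · have hjk : j = (k : Int) := by omega
            have : (k : Int) ∈ j :: rest := by simp [← hjk]
            simp [hje, this, hjk ▸ hband]
          · simp only [if_neg hje]
            have hcc : ¬((k : Int) ∈ j :: rest ∧ lo ≤ (k : Int) ∧ (k : Int) ≤ hi) := by
              rintro ⟨hm, hb⟩
              rcases List.mem_cons.mp hm with h | h
              · exact hje (by omega)
              · exact hmem ⟨h, hb⟩
            simp only [List.mem_cons] at hcc ⊢
            simp [hcc]
      · simp only [if_neg hband]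
        by_cases hm : (k : Int) ∈ rest ∧ lo ≤ (k : Int) ∧ (k : Int) ≤ hi
        · rw [if_pos hm, if_pos ⟨List.mem_cons.mpr (Or.inr hm.1), hm.2⟩]
        · have hcc : ¬((k : Int) ∈ j :: rest ∧ lo ≤ (k : Int) ∧ (k : Int) ≤ hi) := by
            rintro ⟨hmm, hb⟩
            rcases List.mem_cons.mp hmm with h | h
            · exact hband (h ▸ hb)
            · exact hm ⟨h, hb⟩
          rw [if_neg hm]
          simp only [List.mem_cons] at hcc ⊢
          simp [hcc]

-- Element of a three-segment replicate concatenation.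
lemma getElem_rep3 {α : Type} (a b c : Nat) (x y z : α) (k : Nat)
    (h : k < (List.replicate a x ++ List.replicate b y ++ List.replicate c z).length) :
    (List.replicate a x ++ List.replicate b y ++ List.replicate c z)[k] =
      if k < a then x else if k < a + b then y else z := by
  simp only [List.getElem_append, List.getElem_replicate, List.length_replicate,
    List.length_append] at h ⊢
  split_ifs <;> first | rfl | omega

-- A's written row equals the indicator of the column band, element-wise.
lemma rowA_getElem (cols lo hi : Int) (k : Nat) (hk : k < cols.toNat)
    (hk' : k < ((PySem.List.pyRange 0 cols 1).foldl
        (fun r j => if lo ≤ j ∧ j ≤ hi then r.set j.toNat 1 else r)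
        (List.replicate cols.toNat (0 : Int))).length) :
    ((PySem.List.pyRange 0 cols 1).foldl
        (fun r j => if lo ≤ j ∧ j ≤ hi then r.set j.toNat 1 else r)
        (List.replicate cols.toNat (0 : Int)))[k] =
      if lo ≤ (k : Int) ∧ (k : Int) ≤ hi then 1 else 0 := by
  have hmem : (k : Int) ∈ PySem.List.pyRange 0 cols 1 := by
    rw [PySem.List.mem_pyRange_one]; omega
  have hjs : ∀ j ∈ PySem.List.pyRange 0 cols 1, 0 ≤ j := by
    intro j hj; rw [PySem.List.mem_pyRange_one] at hj; omega
  rw [foldSet_getElem lo hi _ hjs _ k (by simpa using hk) hk']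
  simp [hmem]

-- A's written row equals B's three-segment row (or the zero row when the band is empty).
lemma rowA_eq (cols lo2 hi2 : Int) :
    ((PySem.List.pyRange 0 cols 1).foldl
        (fun r j => if lo2 ≤ j ∧ j ≤ hi2 then r.set j.toNat 1 else r)
        (List.replicate cols.toNat (0 : Int))) =
      if max 0 lo2 > min (cols - 1) hi2 then List.replicate cols.toNat (0 : Int)
      else List.replicate (max 0 lo2).toNat 0
            ++ List.replicate (min (cols - 1) hi2 - max 0 lo2 + 1).toNat 1
            ++ List.replicate (cols - 1 - min (cols - 1) hi2).toNat 0 := by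
  have hlen : ((PySem.List.pyRange 0 cols 1).foldl
      (fun r j => if lo2 ≤ j ∧ j ≤ hi2 then r.set j.toNat 1 else r)
      (List.replicate cols.toNat (0 : Int))).length = cols.toNat := by
    rw [foldSet_length]; simp
  by_cases hdeg : max 0 lo2 > min (cols - 1) hi2
  · rw [if_pos hdeg]
    apply List.ext_getElem
    · rw [hlen]; simp
    · intro k hk1 hk2
      have hkc : k < cols.toNat := hlen ▸ hk1
      rw [rowA_getElem cols lo2 hi2 k hkc hk1, List.getElem_replicate,
        if_neg (by omega : ¬(lo2 ≤ (k : Int) ∧ (k : Int) ≤ hi2))]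
  · rw [if_neg hdeg]
    apply List.ext_getElem
    · rw [hlen]; simp only [List.length_append, List.length_replicate]; omega
    · intro k hk1 hk2
      have hkc : k < cols.toNat := hlen ▸ hk1
      rw [rowA_getElem cols lo2 hi2 k hkc hk1, getElem_rep3]
      split_ifs <;> omega

-- ===== VERDICT (by name: the statement is the Claim_ definition above) =====
theorem queryToBinary_spec : Claim_equal_queryToBinary := by
  intro qi cols rows _ hpre
  unfold Spec_queryToBinary
  match qi with
  | [] => exact absurd hpre (by simp [Pre_queryToBinary])
  | (k0, k1, v) :: qs =>
    match v with
    | [] => exact absurd hpre (by simp [Pre_queryToBinary])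
    | [_] => exact absurd hpre (by simp [Pre_queryToBinary])
    | v0 :: v1 :: vs =>
      have h0 : PySem.List.pyGet? ((k0, k1, v0 :: v1 :: vs) :: qs) 0
          = some (k0, k1, v0 :: v1 :: vs) := by
        simp [PySem.List.pyGet?, PySem.List.pyIdx?]
      have hnn : (0 : Int) ≤ (vs.length : Int) + 1 := by omega
      have hw0 : PySem.List.pyGet? (v0 :: v1 :: vs) 0 = some v0 := by
        simp [PySem.List.pyGet?, PySem.List.pyIdx?, hnn]
      have hw1 : PySem.List.pyGet? (v0 :: v1 :: vs) 1 = some v1 := by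
        simp [PySem.List.pyGet?, PySem.List.pyIdx?, hnn]
      simp only [queryToBinary, queryToBinary_alt, h0, hw0, hw1]
      by_cases hdeg : max 0 (min k0 k1) > min ((rows.toNat : Int) - 1) (max k0 k1) ∨
          max 0 (min v0 v1) > min (cols - 1) (max v0 v1)
      · rw [if_pos hdeg]
        apply List.ext_getElem
        · simp only [List.length_map, PySem.List.length_pyRange_one, List.length_replicate]
          omega
        · intro i h1 h2
          simp only [List.length_map, PySem.List.length_pyRange_one] at h1
          rw [List.getElem_map, PySem.List.getElem_pyRange_one, zero_add,
            rowA_eq cols (min v0 v1) (max v0 v1), List.getElem_replicate]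
          rcases hdeg with hr | hc
          · split_ifs <;> first | rfl | omega
          · split_ifs <;> first | rfl | omega
      · rw [if_neg hdeg]
        rw [not_or] at hdeg
        apply List.ext_getElem
        · simp only [List.length_map, PySem.List.length_pyRange_one, List.length_append,
            List.length_replicate]
          omega
        · intro i h1 h2
          simp only [List.length_map, PySem.List.length_pyRange_one] at h1
          rw [List.getElem_map, PySem.List.getElem_pyRange_one, zero_add,
            rowA_eq cols (min v0 v1) (max v0 v1), getElem_rep3]
          split_ifs <;> first | rfl | omega
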